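-- pv_equiv track=rewrite | github.com/nastyh/LeetCode | Basic Data Structures/389_Find_the_Difference.py | findTheDifference_sort
-- ===== SOURCE A (Python) =====
-- def findTheDifference_sort(s, t):
--     sorted_s = sorted(s)
--     sorted_t = sorted(t)
--     i = 0
--     while i < len(s):
--         if sorted_s[i] != sorted_t[i]:
--             return sorted_t[i]
--         i += 1
--     return sorted_t[i]
-- ===== SOURCE B (Python) =====
-- def findTheDifference_sort(s, t):
--     ss = sorted(s)
--     tt = sorted(t)
--     # Binary search for the length of the longest common prefix of the two
--     # sorted sequences; the answer is the character of sorted(t) just after it.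
--     lo, hi = 0, len(ss)
--     while lo < hi:
--         mid = (lo + hi + 1) // 2
--         if ss[:mid] == tt[:mid]:
--             lo = mid
--         else:
--             hi = mid - 1
--     return tt[lo]
-- ===== Notes on version B (the rewrite author's own statement) =====
-- stated objective: alternative
-- what changed: Replaced the linear index-by-index scan for the first mismatch of the two sorted sequences by a binary search for the length of their longest common prefix (prefix equality is monotone), returning the character of sorted(t) just after it; Pre_ excludes exactly the inputs where sorted(t) is a prefix of sorted(s), on which both A and B raise IndexError.
import Mathlib
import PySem

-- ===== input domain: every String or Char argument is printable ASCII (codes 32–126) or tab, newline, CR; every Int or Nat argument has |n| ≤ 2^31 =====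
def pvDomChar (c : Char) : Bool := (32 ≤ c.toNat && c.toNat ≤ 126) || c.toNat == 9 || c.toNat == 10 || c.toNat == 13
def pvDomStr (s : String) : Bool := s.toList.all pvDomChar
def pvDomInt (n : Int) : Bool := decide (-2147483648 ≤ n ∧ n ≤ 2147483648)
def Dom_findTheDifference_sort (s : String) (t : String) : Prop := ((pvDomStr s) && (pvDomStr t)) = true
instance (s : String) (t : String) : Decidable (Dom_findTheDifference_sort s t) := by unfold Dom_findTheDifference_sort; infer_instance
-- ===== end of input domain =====

-- B replaces the linear first-mismatch scan of the two sorted strings by a binary search for their longest common prefix; proved equal wherever A returns.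


-- ===== PORT A =====
-- the while loop: i runs while i < slen; an out-of-range t-index only happens outside Pre_ (IndexError in Python), so pyGetD's default is never the result there
def faLoop (ss st : List Char) (slen : Nat) (i : Nat) : String :=
  if i < slen then
    if PySem.List.pyGetD ss (i : Int) ' ' ≠ PySem.List.pyGetD st (i : Int) ' ' then
      String.ofList [PySem.List.pyGetD st (i : Int) ' ']
    else faLoop ss st slen (i + 1)
  else String.ofList [PySem.List.pyGetD st (i : Int) ' ']
termination_by slen - i

def findTheDifference_sort (s : String) (t : String) : String :=
  let sorted_s := PySem.List.sorted s.toList (fun x => x) false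
  let sorted_t := PySem.List.sorted t.toList (fun x => x) false
  faLoop sorted_s sorted_t s.toList.length 0

-- ===== PORT B =====
-- the while loop of Source B: binary search on lo..hi; ss[:mid] is PySem.List.slice
def fbLoop (ss tt : List Char) (lo hi : Nat) : Nat :=
  if lo < hi then
    let mid := (lo + hi + 1) / 2
    if PySem.List.slice ss none (some (mid : Int)) == PySem.List.slice tt none (some (mid : Int)) then
      fbLoop ss tt mid hi
    else fbLoop ss tt lo (mid - 1)
  else lo
termination_by hi - lo
decreasing_by all_goals omega

def findTheDifference_sort_alt (s : String) (t : String) : String :=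
  let ss := PySem.List.sorted s.toList (fun x => x) false
  let tt := PySem.List.sorted t.toList (fun x => x) false
  let lo := fbLoop ss tt 0 ss.length
  -- tt[lo] : out of range only outside Pre_ (IndexError in Python)
  String.ofList [PySem.List.pyGetD tt (lo : Int) ' ']

-- ===== PRECONDITION & SPEC =====
-- Pre_ excludes exactly the inputs on which A raises IndexError (sorted(t) is a prefix of
-- sorted(s), so the scan runs off the end of sorted(t)); B raises IndexError there too.
def Pre_findTheDifference_sort (s : String) (t : String) : Prop :=
  ¬ (PySem.List.sorted t.toList (fun x => x) false) <+: (PySem.List.sorted s.toList (fun x => x) false)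
instance (s : String) (t : String) : Decidable (Pre_findTheDifference_sort s t) := by
  unfold Pre_findTheDifference_sort; infer_instance

def pvWitness_findTheDifference_sort : String × String := ("ab", "bca")

def Spec_findTheDifference_sort (s : String) (t : String) (out : String) : Prop := out = findTheDifference_sort_alt s t
instance (s : String) (t : String) (out : String) : Decidable (Spec_findTheDifference_sort s t out) := by unfold Spec_findTheDifference_sort; infer_instance

-- ===== CLAIM (what is proved, stated in full; the proofs are below) =====
def Claim_equal_findTheDifference_sort : Prop := ∀ (s : String) (t : String), Dom_findTheDifference_sort s t → Pre_findTheDifference_sort s t → Spec_findTheDifference_sort s t (findTheDifference_sort s t)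

-- ===== LEMMAS AND PROOFS =====

-- proof-side: length of the longest common prefix
def lcpN : List Char → List Char → Nat
  | a :: as, b :: bs => if a = b then lcpN as bs + 1 else 0
  | _, _ => 0

lemma lcpN_le_left : ∀ a b : List Char, lcpN a b ≤ a.length := by
  intro a; induction a with
  | nil => intro b; cases b <;> simp [lcpN]
  | cons x xs ih =>
    intro b; cases b with
    | nil => simp [lcpN]
    | cons y ys =>
      simp only [lcpN]
      split_ifs with h
      · have := ih ys; simp; omega
      · simp

lemma lcpN_le_right : ∀ a b : List Char, lcpN a b ≤ b.length := by
  intro a; induction a with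
  | nil => intro b; cases b <;> simp [lcpN]
  | cons x xs ih =>
    intro b; cases b with
    | nil => simp [lcpN]
    | cons y ys =>
      simp only [lcpN]
      split_ifs with h
      · have := ih ys; simp; omega
      · simp

lemma lcpN_take : ∀ a b : List Char, a.take (lcpN a b) = b.take (lcpN a b) := by
  intro a; induction a with
  | nil => intro b; cases b <;> simp [lcpN]
  | cons x xs ih =>
    intro b; cases b with
    | nil => simp [lcpN]
    | cons y ys =>
      simp only [lcpN]
      split_ifs with h
      · subst h; simp [ih ys]
      · simp

lemma lcpN_mismatch : ∀ a b : List Char, lcpN a b < a.length → lcpN a b < b.length →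
    a.getD (lcpN a b) ' ' ≠ b.getD (lcpN a b) ' ' := by
  intro a; induction a with
  | nil => intro b h1 _; simp at h1
  | cons x xs ih =>
    intro b h1 h2; cases b with
    | nil => simp at h2
    | cons y ys =>
      simp only [lcpN] at *
      split_ifs with h
      · subst h
        rw [if_pos rfl] at h1 h2
        simpa using ih ys (by simpa using h1) (by simpa using h2)
      · simpa using h

-- take-prefix-equality is exactly "k ≤ lcpN" once sorted(t) is not a prefix of sorted(s)
lemma take_eq_iff_le_lcpN (a b : List Char) (hb : lcpN a b < b.length) (k : Nat) :
    a.take k = b.take k ↔ k ≤ lcpN a b := by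
  constructor
  · intro hk
    by_contra hgt
    push Not at hgt
    set L := lcpN a b with hL
    by_cases hla : L < a.length
    · have h1 : (a.take k).getD L ' ' = a.getD L ' ' := by
        rw [List.getD_eq_getElem?_getD, List.getD_eq_getElem?_getD,
          List.getElem?_take_of_lt hgt]
      have h2 : (b.take k).getD L ' ' = b.getD L ' ' := by
        rw [List.getD_eq_getElem?_getD, List.getD_eq_getElem?_getD,
          List.getElem?_take_of_lt hgt]
      have := lcpN_mismatch a b hla hb
      rw [← h1, ← h2, hk] at this
      exact this rfl
    · have hLa : L = a.length := le_antisymm (lcpN_le_left a b) (not_lt.mp hla)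
      have : (a.take k).length = (b.take k).length := by rw [hk]
      rw [List.length_take, List.length_take] at this
      omega
  · intro hk
    have h := lcpN_take a b
    calc a.take k = (a.take (lcpN a b)).take k := by rw [List.take_take, Nat.min_eq_left hk]
      _ = (b.take (lcpN a b)).take k := by rw [h]
      _ = b.take k := by rw [List.take_take, Nat.min_eq_left hk]

-- A's loop lands on index lcpN
lemma faLoop_eq_lcpN (ss tt : List Char) (hb : lcpN ss tt < tt.length) (i : Nat)
    (hi : i ≤ lcpN ss tt) :
    faLoop ss tt ss.length i = String.ofList [tt.getD (lcpN ss tt) ' '] := by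
  set L := lcpN ss tt with hL
  have hLa : L ≤ ss.length := lcpN_le_left ss tt
  have hgT : ∀ j, j < tt.length → PySem.List.pyGetD tt (j : Int) ' ' = tt.getD j ' ' := by
    intro j hj
    simp [PySem.List.pyGetD_natCast, List.getD_eq_getElem?_getD, List.getElem?_eq_getElem hj]
  by_cases hlt : i < L
  · have hia : i < ss.length := lt_of_lt_of_le hlt hLa
    have hit : i < tt.length := lt_of_lt_of_le hlt (le_of_lt hb)
    have heq : ss.getD i ' ' = tt.getD i ' ' := by
      have h := lcpN_take ss tt
      have h1 : (ss.take L).getD i ' ' = ss.getD i ' ' := by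
        rw [List.getD_eq_getElem?_getD, List.getD_eq_getElem?_getD, List.getElem?_take_of_lt hlt]
      have h2 : (tt.take L).getD i ' ' = tt.getD i ' ' := by
        rw [List.getD_eq_getElem?_getD, List.getD_eq_getElem?_getD, List.getElem?_take_of_lt hlt]
      rw [← h1, ← h2, hL, h]
    have hgS : PySem.List.pyGetD ss (i : Int) ' ' = ss.getD i ' ' := by
      simp [PySem.List.pyGetD_natCast, List.getD_eq_getElem?_getD, List.getElem?_eq_getElem hia]
    rw [faLoop, if_pos hia, hgS, hgT i hit, if_neg (fun hne => hne heq)]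
    exact faLoop_eq_lcpN ss tt hb (i + 1) hlt
  · have hiL : i = L := le_antisymm hi (not_lt.mp hlt)
    rw [hiL]
    by_cases hla : L < ss.length
    · have hmm := lcpN_mismatch ss tt (hL ▸ hla) hb
      rw [← hL] at hmm
      have hgS : PySem.List.pyGetD ss (L : Int) ' ' = ss.getD L ' ' := by
        simp [PySem.List.pyGetD_natCast, List.getD_eq_getElem?_getD, List.getElem?_eq_getElem hla]
      rw [faLoop, if_pos hla, hgS, hgT L hb, if_pos hmm]
    · rw [faLoop, if_neg hla, hgT L hb]
termination_by lcpN ss tt - i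
decreasing_by omega

-- B's binary search lands on lcpN
lemma fbLoop_eq_lcpN (ss tt : List Char) (hb : lcpN ss tt < tt.length) (lo hi : Nat)
    (h1 : lo ≤ lcpN ss tt) (h2 : lcpN ss tt ≤ hi) :
    fbLoop ss tt lo hi = lcpN ss tt := by
  by_cases hlh : lo < hi
  · rw [fbLoop, if_pos hlh]
    have hcond : (PySem.List.slice ss none (some (((lo + hi + 1) / 2 : Nat) : Int)) ==
        PySem.List.slice tt none (some (((lo + hi + 1) / 2 : Nat) : Int))) =
        decide ((lo + hi + 1) / 2 ≤ lcpN ss tt) := by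
      rw [PySem.List.slice_to_natCast, PySem.List.slice_to_natCast]
      by_cases h : (lo + hi + 1) / 2 ≤ lcpN ss tt
      · simp [h, (take_eq_iff_le_lcpN ss tt hb _).mpr h]
      · have : ¬ ss.take ((lo + hi + 1) / 2) = tt.take ((lo + hi + 1) / 2) :=
          fun he => h ((take_eq_iff_le_lcpN ss tt hb _).mp he)
        simp [h, this]
    simp only [hcond]
    by_cases h : (lo + hi + 1) / 2 ≤ lcpN ss tt
    · rw [if_pos (by simp [h])]
      exact fbLoop_eq_lcpN ss tt hb _ hi h h2
    · rw [if_neg (by simp [h])]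
      exact fbLoop_eq_lcpN ss tt hb lo _ h1 (by omega)
  · rw [fbLoop, if_neg hlh]; omega
termination_by hi - lo
decreasing_by all_goals omega

-- ===== VERDICT (by name: the statement is the Claim_ definition above) =====
theorem findTheDifference_sort_spec : Claim_equal_findTheDifference_sort := by
  intro s t _ hpre
  unfold Spec_findTheDifference_sort
  simp only [findTheDifference_sort, findTheDifference_sort_alt]
  unfold Pre_findTheDifference_sort at hpre
  set ss := PySem.List.sorted s.toList (fun x => x) false with hssdef
  set tt := PySem.List.sorted t.toList (fun x => x) false with httdef
  have hlen : s.toList.length = ss.length := (PySem.List.length_sorted s.toList (fun x => x) false).symm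
  -- under Pre_, the common prefix ends strictly inside tt
  have hb : lcpN ss tt < tt.length := by
    rcases lt_or_eq_of_le (lcpN_le_right ss tt) with h | h
    · exact h
    · exfalso
      apply hpre
      have h2 : ss.take (lcpN ss tt) = tt := by rw [lcpN_take ss tt, h, List.take_length]
      exact h2 ▸ List.take_prefix _ _
  rw [hlen, faLoop_eq_lcpN ss tt hb 0 (Nat.zero_le _),
    fbLoop_eq_lcpN ss tt hb 0 ss.length (Nat.zero_le _) (lcpN_le_left ss tt)]
  have : PySem.List.pyGetD tt ((lcpN ss tt : Nat) : Int) ' ' = tt.getD (lcpN ss tt) ' ' := by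
    simp [PySem.List.pyGetD_natCast, List.getD_eq_getElem?_getD, List.getElem?_eq_getElem hb]
  rw [this]
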